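-- pv_equiv track=rewrite | github.com/8Dionysus/ATM10-Agent | scripts/pilot_runtime_loop.py | _service_names_from_flags
-- ===== SOURCE A (Python) =====
-- from typing import Any, Callable, Mapping, Sequence
--
-- def _service_names_from_flags(degraded_flags: list[str], stage_errors: Mapping[str, str]) -> list[str]:
--     services: list[str] = []
--     for flag in degraded_flags:
--         normalized = str(flag).strip().lower()
--         if not normalized:
--             continue
--         if (
--             normalized.startswith("capture")
--             or normalized.startswith("vision")
--             or normalized.startswith("session")
--             or normalized.startswith("hud")
--         ):
--             services.append("capture")
--         elif normalized.startswith("vlm"):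
--             services.append("vlm")
--         elif normalized.startswith("hybrid") or normalized.startswith("retrieval"):
--             services.append("gateway")
--         elif normalized.startswith("tts"):
--             services.append("tts_runtime_service")
--         elif normalized.startswith("voice") or normalized.startswith("asr"):
--             services.append("voice_runtime_service")
--         elif normalized.startswith("transcript"):
--             services.append("voice_runtime_service")
--         elif normalized.startswith("grounded_reply"):
--             services.append("text_core")
--     for stage_name in stage_errors:
--         if stage_name == "capture":
--             services.append("capture")
--         elif stage_name == "session":
--             services.append("capture")
--         elif stage_name == "hud_state":
--             services.append("capture")
--         elif stage_name == "vision":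
--             services.append("vlm")
--         elif stage_name == "hybrid":
--             services.append("gateway")
--         elif stage_name == "tts":
--             services.append("tts_runtime_service")
--         elif stage_name == "asr":
--             services.append("voice_runtime_service")
--         elif stage_name == "grounded_reply":
--             services.append("text_core")
--     return sorted(dict.fromkeys(services))
-- ===== SOURCE B (Python) =====
-- # Service-major inversion: instead of scanning inputs and mapping each to a
-- # service then sort+dedup, iterate the six services in sorted order and emit
-- # each one whose trigger condition (a prefix match among the flags, or a stage
-- # key present) holds. Output is sorted and unique by construction.
-- # Correct because A's prefixes are mutually non-prefix (so at most one service
-- # matches a flag, making branch order immaterial) and the final sorted-dedup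
-- # makes append order and multiplicity immaterial.
--
-- _SERVICE_TRIGGERS = {
--     "capture": (("capture", "vision", "session", "hud"), ("capture", "session", "hud_state")),
--     "gateway": (("hybrid", "retrieval"), ("hybrid",)),
--     "text_core": (("grounded_reply",), ("grounded_reply",)),
--     "tts_runtime_service": (("tts",), ("tts",)),
--     "vlm": (("vlm",), ("vision",)),
--     "voice_runtime_service": (("voice", "asr", "transcript"), ("asr",)),
-- }
--
--
-- def _service_names_from_flags(degraded_flags, stage_errors):
--     normalized = [str(flag).strip().lower() for flag in degraded_flags]
--     return [
--         service
--         for service, (prefixes, stages) in sorted(_SERVICE_TRIGGERS.items())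
--         if any(n.startswith(p) for n in normalized for p in prefixes)
--         or any(s in stage_errors for s in stages)
--     ]
-- ===== Notes on version B (the rewrite author's own statement) =====
-- stated objective: alternative
-- what changed: Inverts the traversal: instead of A's input-major scan (classify each flag/stage via if/elif chains, append to a list, then sorted(dict.fromkeys(...))), B iterates the six services in sorted key order and emits each service whose trigger condition holds (some flag has one of its prefixes, or a stage key is present), so the output is sorted and deduplicated by construction with no sort or dedup pass; correct because the prefixes are mutually non-prefix and the final order/dedup erase append order and multiplicity.
import Mathlib
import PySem

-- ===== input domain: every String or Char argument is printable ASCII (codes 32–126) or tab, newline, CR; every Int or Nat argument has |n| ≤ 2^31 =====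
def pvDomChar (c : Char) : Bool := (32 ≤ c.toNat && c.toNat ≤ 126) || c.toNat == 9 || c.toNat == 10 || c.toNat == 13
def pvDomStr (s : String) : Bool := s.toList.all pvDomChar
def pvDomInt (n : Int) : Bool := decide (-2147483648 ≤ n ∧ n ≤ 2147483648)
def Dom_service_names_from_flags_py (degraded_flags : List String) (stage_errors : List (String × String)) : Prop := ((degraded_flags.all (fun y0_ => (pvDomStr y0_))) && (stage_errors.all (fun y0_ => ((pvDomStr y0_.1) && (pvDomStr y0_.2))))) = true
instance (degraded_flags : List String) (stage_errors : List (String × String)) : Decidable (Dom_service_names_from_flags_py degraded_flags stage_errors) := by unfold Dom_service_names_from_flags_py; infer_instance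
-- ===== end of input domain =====

-- B inverts the traversal: it iterates the six services in sorted order and emits each whose trigger fires, so the output is sorted/deduped by construction (alternative; same cost).


-- ===== PORT A =====
def service_names_from_flags_py (degraded_flags : List String) (stage_errors : List (String × String)) : List String :=
  let services : List String := []
  let services := degraded_flags.foldl (fun services flag =>
    let normalized := PySem.Str.lower (PySem.Str.strip flag)
    if normalized = "" then services
    else if PySem.Str.startswith normalized "capture" || PySem.Str.startswith normalized "vision"
         || PySem.Str.startswith normalized "session" || PySem.Str.startswith normalized "hud" then
      services ++ ["capture"]
    else if PySem.Str.startswith normalized "vlm" then services ++ ["vlm"]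
    else if PySem.Str.startswith normalized "hybrid" || PySem.Str.startswith normalized "retrieval" then services ++ ["gateway"]
    else if PySem.Str.startswith normalized "tts" then services ++ ["tts_runtime_service"]
    else if PySem.Str.startswith normalized "voice" || PySem.Str.startswith normalized "asr" then services ++ ["voice_runtime_service"]
    else if PySem.Str.startswith normalized "transcript" then services ++ ["voice_runtime_service"]
    else if PySem.Str.startswith normalized "grounded_reply" then services ++ ["text_core"]
    else services) services
  let services := stage_errors.foldl (fun services p =>
    let stage_name := p.1
    if stage_name = "capture" then services ++ ["capture"]
    else if stage_name = "session" then services ++ ["capture"]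
    else if stage_name = "hud_state" then services ++ ["capture"]
    else if stage_name = "vision" then services ++ ["vlm"]
    else if stage_name = "hybrid" then services ++ ["gateway"]
    else if stage_name = "tts" then services ++ ["tts_runtime_service"]
    else if stage_name = "asr" then services ++ ["voice_runtime_service"]
    else if stage_name = "grounded_reply" then services ++ ["text_core"]
    else services) services
  PySem.List.sorted (PySem.List.dedup services) (fun x => x) false

-- ===== PORT B =====
-- _SERVICE_TRIGGERS: service -> (flag prefixes, stage names); keys distinct, so
-- sorted(_SERVICE_TRIGGERS.items()) orders by the key alone.
def pvServiceTriggers : List (String × (List String × List String)) :=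
  [("capture", (["capture", "vision", "session", "hud"], ["capture", "session", "hud_state"])),
   ("gateway", (["hybrid", "retrieval"], ["hybrid"])),
   ("text_core", (["grounded_reply"], ["grounded_reply"])),
   ("tts_runtime_service", (["tts"], ["tts"])),
   ("vlm", (["vlm"], ["vision"])),
   ("voice_runtime_service", (["voice", "asr", "transcript"], ["asr"]))]

def service_names_from_flags_py_alt (degraded_flags : List String) (stage_errors : List (String × String)) : List String :=
  let normalized := degraded_flags.map (fun flag => PySem.Str.lower (PySem.Str.strip flag))
  ((PySem.List.sorted pvServiceTriggers (fun t => t.1) false).filter (fun t =>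
      normalized.any (fun n => t.2.1.any (fun p => PySem.Str.startswith n p))
      || t.2.2.any (fun s => stage_errors.any (fun q => q.1 == s)))).map (fun t => t.1)

-- ===== PRECONDITION & SPEC =====
def Spec_service_names_from_flags_py (degraded_flags : List String) (stage_errors : List (String × String)) (out : List String) : Prop := out = service_names_from_flags_py_alt degraded_flags stage_errors
instance (degraded_flags : List String) (stage_errors : List (String × String)) (out : List String) : Decidable (Spec_service_names_from_flags_py degraded_flags stage_errors out) := by unfold Spec_service_names_from_flags_py; infer_instance

-- ===== CLAIM (what is proved, stated in full; the proofs are below) =====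
def Claim_equal_service_names_from_flags_py : Prop := ∀ (degraded_flags : List String) (stage_errors : List (String × String)), Dom_service_names_from_flags_py degraded_flags stage_errors → Spec_service_names_from_flags_py degraded_flags stage_errors (service_names_from_flags_py degraded_flags stage_errors)

-- ===== LEMMAS AND PROOFS =====

-- the if/elif chain of A's flag loop, as a function of the normalized string
def pvChain (n : String) : List String :=
  if n = "" then []
  else if PySem.Str.startswith n "capture" || PySem.Str.startswith n "vision"
       || PySem.Str.startswith n "session" || PySem.Str.startswith n "hud" then ["capture"]
  else if PySem.Str.startswith n "vlm" then ["vlm"]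
  else if PySem.Str.startswith n "hybrid" || PySem.Str.startswith n "retrieval" then ["gateway"]
  else if PySem.Str.startswith n "tts" then ["tts_runtime_service"]
  else if PySem.Str.startswith n "voice" || PySem.Str.startswith n "asr" then ["voice_runtime_service"]
  else if PySem.Str.startswith n "transcript" then ["voice_runtime_service"]
  else if PySem.Str.startswith n "grounded_reply" then ["text_core"]
  else []

def pvAFlagElems (flag : String) : List String := pvChain (PySem.Str.lower (PySem.Str.strip flag))

-- elements A's stage loop appends for one stage name
def pvAStageElems (k : String) : List String :=
  if k = "capture" then ["capture"]
  else if k = "session" then ["capture"]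
  else if k = "hud_state" then ["capture"]
  else if k = "vision" then ["vlm"]
  else if k = "hybrid" then ["gateway"]
  else if k = "tts" then ["tts_runtime_service"]
  else if k = "asr" then ["voice_runtime_service"]
  else if k = "grounded_reply" then ["text_core"]
  else []

-- the multiset A accumulates before sorting/deduping
def pvL (degraded_flags : List String) (stage_errors : List (String × String)) : List String :=
  degraded_flags.flatMap pvAFlagElems ++ stage_errors.flatMap (fun p => pvAStageElems p.1)

theorem pvA_flags (l : List String) (acc : List String) :
    l.foldl (fun services flag =>
      let normalized := PySem.Str.lower (PySem.Str.strip flag)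
      if normalized = "" then services
      else if PySem.Str.startswith normalized "capture" || PySem.Str.startswith normalized "vision"
           || PySem.Str.startswith normalized "session" || PySem.Str.startswith normalized "hud" then
        services ++ ["capture"]
      else if PySem.Str.startswith normalized "vlm" then services ++ ["vlm"]
      else if PySem.Str.startswith normalized "hybrid" || PySem.Str.startswith normalized "retrieval" then services ++ ["gateway"]
      else if PySem.Str.startswith normalized "tts" then services ++ ["tts_runtime_service"]
      else if PySem.Str.startswith normalized "voice" || PySem.Str.startswith normalized "asr" then services ++ ["voice_runtime_service"]
      else if PySem.Str.startswith normalized "transcript" then services ++ ["voice_runtime_service"]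
      else if PySem.Str.startswith normalized "grounded_reply" then services ++ ["text_core"]
      else services) acc = acc ++ l.flatMap pvAFlagElems := by
  induction l generalizing acc with
  | nil => simp
  | cons f t ih =>
    simp only [List.foldl_cons, List.flatMap_cons, ih]
    have hstep : (let normalized := PySem.Str.lower (PySem.Str.strip f)
      if normalized = "" then acc
      else if PySem.Str.startswith normalized "capture" || PySem.Str.startswith normalized "vision"
           || PySem.Str.startswith normalized "session" || PySem.Str.startswith normalized "hud" then
        acc ++ ["capture"]
      else if PySem.Str.startswith normalized "vlm" then acc ++ ["vlm"]
      else if PySem.Str.startswith normalized "hybrid" || PySem.Str.startswith normalized "retrieval" then acc ++ ["gateway"]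
      else if PySem.Str.startswith normalized "tts" then acc ++ ["tts_runtime_service"]
      else if PySem.Str.startswith normalized "voice" || PySem.Str.startswith normalized "asr" then acc ++ ["voice_runtime_service"]
      else if PySem.Str.startswith normalized "transcript" then acc ++ ["voice_runtime_service"]
      else if PySem.Str.startswith normalized "grounded_reply" then acc ++ ["text_core"]
      else acc) = acc ++ pvAFlagElems f := by
      simp only [pvAFlagElems, pvChain]
      split_ifs <;> simp
    rw [hstep, List.append_assoc]

theorem pvA_stages (l : List (String × String)) (acc : List String) :
    l.foldl (fun services p =>
      let stage_name := p.1
      if stage_name = "capture" then services ++ ["capture"]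
      else if stage_name = "session" then services ++ ["capture"]
      else if stage_name = "hud_state" then services ++ ["capture"]
      else if stage_name = "vision" then services ++ ["vlm"]
      else if stage_name = "hybrid" then services ++ ["gateway"]
      else if stage_name = "tts" then services ++ ["tts_runtime_service"]
      else if stage_name = "asr" then services ++ ["voice_runtime_service"]
      else if stage_name = "grounded_reply" then services ++ ["text_core"]
      else services) acc = acc ++ l.flatMap (fun p => pvAStageElems p.1) := by
  induction l generalizing acc with
  | nil => simp
  | cons f t ih =>
    simp only [List.foldl_cons, List.flatMap_cons, ih]
    have hstep : (let stage_name := f.1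
      if stage_name = "capture" then acc ++ ["capture"]
      else if stage_name = "session" then acc ++ ["capture"]
      else if stage_name = "hud_state" then acc ++ ["capture"]
      else if stage_name = "vision" then acc ++ ["vlm"]
      else if stage_name = "hybrid" then acc ++ ["gateway"]
      else if stage_name = "tts" then acc ++ ["tts_runtime_service"]
      else if stage_name = "asr" then acc ++ ["voice_runtime_service"]
      else if stage_name = "grounded_reply" then acc ++ ["text_core"]
      else acc) = acc ++ pvAStageElems f.1 := by
      simp only [pvAStageElems]
      split_ifs <;> simp
    rw [hstep, List.append_assoc]

-- per-service characterisations of A's per-item contributions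

theorem pvExcl (s p q : List Char) (hp : PySem.Chars.startswith s p = true)
    (h1 : ¬ p <+: q) (h2 : ¬ q <+: p) : ¬ PySem.Chars.startswith s q = true := by
  intro hc
  rw [PySem.Chars.startswith_iff] at hc hp
  rcases List.prefix_or_prefix_of_prefix hp hc with h | h
  · exact h1 h
  · exact h2 h

theorem pvChain_capture (n : String) : "capture" ∈ pvChain n ↔
    (["capture", "vision", "session", "hud"].any (fun p => PySem.Str.startswith n p)) = true := by
  simp only [pvChain]
  split_ifs with h0 h1 h2 h3 h4 h5 h6 h7
  · subst h0; decide
  · simp_all <;> tauto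
  · simp_all <;> tauto
  · simp_all <;> tauto
  · simp_all <;> tauto
  · simp_all <;> tauto
  · simp_all <;> tauto
  · simp_all <;> tauto
  · simp_all <;> tauto

theorem pvChain_gateway (n : String) : "gateway" ∈ pvChain n ↔
    (["hybrid", "retrieval"].any (fun p => PySem.Str.startswith n p)) = true := by
  simp only [pvChain]
  split_ifs with h0 h1 h2 h3 h4 h5 h6 h7
  · subst h0; decide
  · simp only [PySem.Str.startswith_eq, Bool.or_eq_true] at h1
    simp only [List.any_cons, List.any_nil, PySem.Str.startswith_eq, Bool.or_eq_true,
      Bool.or_false, List.mem_singleton]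
    constructor
    · intro hd; exact absurd hd (by decide)
    · rintro (hc|hc) <;> rcases h1 with ((h|h)|h)|h <;>
        exact absurd hc (pvExcl _ _ _ h (by decide) (by decide))
  · simp only [PySem.Str.startswith_eq, Bool.or_eq_true] at h2
    simp only [List.any_cons, List.any_nil, PySem.Str.startswith_eq, Bool.or_eq_true,
      Bool.or_false, List.mem_singleton]
    constructor
    · intro hd; exact absurd hd (by decide)
    · rintro (hc|hc) <;> exact absurd hc (pvExcl _ _ _ h2 (by decide) (by decide))
  · simp_all <;> tauto
  · simp_all <;> tauto
  · simp_all <;> tauto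
  · simp_all <;> tauto
  · simp_all <;> tauto
  · simp_all <;> tauto

theorem pvChain_text_core (n : String) : "text_core" ∈ pvChain n ↔
    (["grounded_reply"].any (fun p => PySem.Str.startswith n p)) = true := by
  simp only [pvChain]
  split_ifs with h0 h1 h2 h3 h4 h5 h6 h7
  · subst h0; decide
  · simp only [PySem.Str.startswith_eq, Bool.or_eq_true] at h1
    simp only [List.any_cons, List.any_nil, PySem.Str.startswith_eq, Bool.or_eq_true,
      Bool.or_false, List.mem_singleton]
    constructor
    · intro hd; exact absurd hd (by decide)
    · intro hc <;> rcases h1 with ((h|h)|h)|h <;>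
        exact absurd hc (pvExcl _ _ _ h (by decide) (by decide))
  · simp only [PySem.Str.startswith_eq, Bool.or_eq_true] at h2
    simp only [List.any_cons, List.any_nil, PySem.Str.startswith_eq, Bool.or_eq_true,
      Bool.or_false, List.mem_singleton]
    constructor
    · intro hd; exact absurd hd (by decide)
    · intro hc <;> exact absurd hc (pvExcl _ _ _ h2 (by decide) (by decide))
  · simp only [PySem.Str.startswith_eq, Bool.or_eq_true] at h3
    simp only [List.any_cons, List.any_nil, PySem.Str.startswith_eq, Bool.or_eq_true,
      Bool.or_false, List.mem_singleton]
    constructor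
    · intro hd; exact absurd hd (by decide)
    · intro hc <;> rcases h3 with h|h <;>
        exact absurd hc (pvExcl _ _ _ h (by decide) (by decide))
  · simp only [PySem.Str.startswith_eq, Bool.or_eq_true] at h4
    simp only [List.any_cons, List.any_nil, PySem.Str.startswith_eq, Bool.or_eq_true,
      Bool.or_false, List.mem_singleton]
    constructor
    · intro hd; exact absurd hd (by decide)
    · intro hc <;> exact absurd hc (pvExcl _ _ _ h4 (by decide) (by decide))
  · simp only [PySem.Str.startswith_eq, Bool.or_eq_true] at h5
    simp only [List.any_cons, List.any_nil, PySem.Str.startswith_eq, Bool.or_eq_true,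
      Bool.or_false, List.mem_singleton]
    constructor
    · intro hd; exact absurd hd (by decide)
    · intro hc <;> rcases h5 with h|h <;>
        exact absurd hc (pvExcl _ _ _ h (by decide) (by decide))
  · simp only [PySem.Str.startswith_eq, Bool.or_eq_true] at h6
    simp only [List.any_cons, List.any_nil, PySem.Str.startswith_eq, Bool.or_eq_true,
      Bool.or_false, List.mem_singleton]
    constructor
    · intro hd; exact absurd hd (by decide)
    · intro hc <;> exact absurd hc (pvExcl _ _ _ h6 (by decide) (by decide))
  · simp_all <;> tauto
  · simp_all <;> tauto

theorem pvChain_tts (n : String) : "tts_runtime_service" ∈ pvChain n ↔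
    (["tts"].any (fun p => PySem.Str.startswith n p)) = true := by
  simp only [pvChain]
  split_ifs with h0 h1 h2 h3 h4 h5 h6 h7
  · subst h0; decide
  · simp only [PySem.Str.startswith_eq, Bool.or_eq_true] at h1
    simp only [List.any_cons, List.any_nil, PySem.Str.startswith_eq, Bool.or_eq_true,
      Bool.or_false, List.mem_singleton]
    constructor
    · intro hd; exact absurd hd (by decide)
    · intro hc <;> rcases h1 with ((h|h)|h)|h <;>
        exact absurd hc (pvExcl _ _ _ h (by decide) (by decide))
  · simp only [PySem.Str.startswith_eq, Bool.or_eq_true] at h2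
    simp only [List.any_cons, List.any_nil, PySem.Str.startswith_eq, Bool.or_eq_true,
      Bool.or_false, List.mem_singleton]
    constructor
    · intro hd; exact absurd hd (by decide)
    · intro hc <;> exact absurd hc (pvExcl _ _ _ h2 (by decide) (by decide))
  · simp only [PySem.Str.startswith_eq, Bool.or_eq_true] at h3
    simp only [List.any_cons, List.any_nil, PySem.Str.startswith_eq, Bool.or_eq_true,
      Bool.or_false, List.mem_singleton]
    constructor
    · intro hd; exact absurd hd (by decide)
    · intro hc <;> rcases h3 with h|h <;>
        exact absurd hc (pvExcl _ _ _ h (by decide) (by decide))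
  · simp_all <;> tauto
  · simp_all <;> tauto
  · simp_all <;> tauto
  · simp_all <;> tauto
  · simp_all <;> tauto

theorem pvChain_vlm (n : String) : "vlm" ∈ pvChain n ↔
    (["vlm"].any (fun p => PySem.Str.startswith n p)) = true := by
  simp only [pvChain]
  split_ifs with h0 h1 h2 h3 h4 h5 h6 h7
  · subst h0; decide
  · simp only [PySem.Str.startswith_eq, Bool.or_eq_true] at h1
    simp only [List.any_cons, List.any_nil, PySem.Str.startswith_eq, Bool.or_eq_true,
      Bool.or_false, List.mem_singleton]
    constructor
    · intro hd; exact absurd hd (by decide)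
    · intro hc <;> rcases h1 with ((h|h)|h)|h <;>
        exact absurd hc (pvExcl _ _ _ h (by decide) (by decide))
  · simp_all <;> tauto
  · simp_all <;> tauto
  · simp_all <;> tauto
  · simp_all <;> tauto
  · simp_all <;> tauto
  · simp_all <;> tauto
  · simp_all <;> tauto

theorem pvChain_voice (n : String) : "voice_runtime_service" ∈ pvChain n ↔
    (["voice", "asr", "transcript"].any (fun p => PySem.Str.startswith n p)) = true := by
  simp only [pvChain]
  split_ifs with h0 h1 h2 h3 h4 h5 h6 h7
  · subst h0; decide
  · simp only [PySem.Str.startswith_eq, Bool.or_eq_true] at h1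
    simp only [List.any_cons, List.any_nil, PySem.Str.startswith_eq, Bool.or_eq_true,
      Bool.or_false, List.mem_singleton]
    constructor
    · intro hd; exact absurd hd (by decide)
    · rintro (hc|hc|hc) <;> rcases h1 with ((h|h)|h)|h <;>
        exact absurd hc (pvExcl _ _ _ h (by decide) (by decide))
  · simp only [PySem.Str.startswith_eq, Bool.or_eq_true] at h2
    simp only [List.any_cons, List.any_nil, PySem.Str.startswith_eq, Bool.or_eq_true,
      Bool.or_false, List.mem_singleton]
    constructor
    · intro hd; exact absurd hd (by decide)
    · rintro (hc|hc|hc) <;> exact absurd hc (pvExcl _ _ _ h2 (by decide) (by decide))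
  · simp only [PySem.Str.startswith_eq, Bool.or_eq_true] at h3
    simp only [List.any_cons, List.any_nil, PySem.Str.startswith_eq, Bool.or_eq_true,
      Bool.or_false, List.mem_singleton]
    constructor
    · intro hd; exact absurd hd (by decide)
    · rintro (hc|hc|hc) <;> rcases h3 with h|h <;>
        exact absurd hc (pvExcl _ _ _ h (by decide) (by decide))
  · simp only [PySem.Str.startswith_eq, Bool.or_eq_true] at h4
    simp only [List.any_cons, List.any_nil, PySem.Str.startswith_eq, Bool.or_eq_true,
      Bool.or_false, List.mem_singleton]
    constructor
    · intro hd; exact absurd hd (by decide)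
    · rintro (hc|hc|hc) <;> exact absurd hc (pvExcl _ _ _ h4 (by decide) (by decide))
  · simp_all <;> tauto
  · simp_all <;> tauto
  · simp_all <;> tauto
  · simp_all <;> tauto

theorem pvStage_capture (k : String) : "capture" ∈ pvAStageElems k ↔
    (["capture", "session", "hud_state"].any (fun s => k == s)) = true := by
  simp only [pvAStageElems]; split_ifs <;> simp_all

theorem pvStage_gateway (k : String) : "gateway" ∈ pvAStageElems k ↔
    (["hybrid"].any (fun s => k == s)) = true := by
  simp only [pvAStageElems]; split_ifs <;> simp_all

theorem pvStage_text_core (k : String) : "text_core" ∈ pvAStageElems k ↔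
    (["grounded_reply"].any (fun s => k == s)) = true := by
  simp only [pvAStageElems]; split_ifs <;> simp_all

theorem pvStage_tts (k : String) : "tts_runtime_service" ∈ pvAStageElems k ↔
    (["tts"].any (fun s => k == s)) = true := by
  simp only [pvAStageElems]; split_ifs <;> simp_all

theorem pvStage_vlm (k : String) : "vlm" ∈ pvAStageElems k ↔
    (["vision"].any (fun s => k == s)) = true := by
  simp only [pvAStageElems]; split_ifs <;> simp_all

theorem pvStage_voice (k : String) : "voice_runtime_service" ∈ pvAStageElems k ↔
    (["asr"].any (fun s => k == s)) = true := by
  simp only [pvAStageElems]; split_ifs <;> simp_all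

-- every accumulated element is one of the six service names
theorem pvChain_sub (n : String) : ∀ y ∈ pvChain n,
    y ∈ ["capture", "gateway", "text_core", "tts_runtime_service", "vlm", "voice_runtime_service"] := by
  intro y hy
  simp only [pvChain] at hy
  split_ifs at hy <;> simp_all
theorem pvStage_sub (k : String) : ∀ y ∈ pvAStageElems k,
    y ∈ ["capture", "gateway", "text_core", "tts_runtime_service", "vlm", "voice_runtime_service"] := by
  intro y hy
  simp only [pvAStageElems] at hy
  split_ifs at hy <;> simp_all

theorem pvL_sub (dfs : List String) (ses : List (String × String)) : ∀ y ∈ pvL dfs ses,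
    y ∈ ["capture", "gateway", "text_core", "tts_runtime_service", "vlm", "voice_runtime_service"] := by
  intro y hy
  simp only [pvL, List.mem_append, List.mem_flatMap] at hy
  rcases hy with ⟨f, _, hf⟩ | ⟨p, _, hp⟩
  · exact pvChain_sub _ y hf
  · exact pvStage_sub _ y hp

-- B's trigger condition for one service ↔ that service occurs in A's multiset
theorem pvCond_iff (dfs : List String) (ses : List (String × String))
    (svc : String) (prefixes stages : List String)
    (Hf : ∀ n, svc ∈ pvChain n ↔ (prefixes.any (fun p => PySem.Str.startswith n p)) = true)
    (Hs : ∀ k, svc ∈ pvAStageElems k ↔ (stages.any (fun s => k == s)) = true) :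
    ((dfs.map (fun flag => PySem.Str.lower (PySem.Str.strip flag))).any
        (fun n => prefixes.any (fun p => PySem.Str.startswith n p))
      || stages.any (fun s => ses.any (fun q => q.1 == s))) = true
    ↔ svc ∈ pvL dfs ses := by
  simp only [pvL, List.mem_append, List.mem_flatMap, Bool.or_eq_true, List.any_eq_true,
    List.mem_map, pvAFlagElems]
  constructor
  · rintro (⟨n, ⟨f, hf, rfl⟩, hn⟩ | ⟨s, hs, q, hq, hqs⟩)
    · exact Or.inl ⟨f, hf, (Hf _).mpr (by simpa using hn)⟩
    · refine Or.inr ⟨q, hq, (Hs _).mpr ?_⟩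
      simp only [List.any_eq_true]
      exact ⟨s, hs, hqs⟩
  · rintro (⟨f, hf, hmem⟩ | ⟨q, hq, hmem⟩)
    · exact Or.inl ⟨_, ⟨f, hf, rfl⟩, by simpa using (Hf _).mp hmem⟩
    · have := (Hs _).mp hmem
      simp only [List.any_eq_true] at this
      obtain ⟨s, hs, hqs⟩ := this
      exact Or.inr ⟨s, hs, q, hq, hqs⟩

theorem pvSorted_triggers :
    PySem.List.sorted pvServiceTriggers (fun t => t.1) false = pvServiceTriggers :=
  PySem.List.sorted_eq_self_of_pairwise _ _ (by simp [pvServiceTriggers, List.pairwise_cons]; decide)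

theorem service_names_from_flags_py_spec : Claim_equal_service_names_from_flags_py := by
  intro dfs ses _
  show _ = _
  unfold service_names_from_flags_py service_names_from_flags_py_alt
  simp only [pvA_flags, pvA_stages, List.nil_append, pvSorted_triggers]
  have hL : dfs.flatMap pvAFlagElems ++ ses.flatMap (fun p => pvAStageElems p.1) = pvL dfs ses := rfl
  rw [hL]
  set p : String × (List String × List String) → Bool := fun t =>
    (dfs.map (fun flag => PySem.Str.lower (PySem.Str.strip flag))).any
        (fun n => t.2.1.any (fun pfx => PySem.Str.startswith n pfx))
      || t.2.2.any (fun s => ses.any (fun q => q.1 == s)) with hp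
  have hsub : ((pvServiceTriggers.filter p).map (fun t => t.1)).Sublist
      (pvServiceTriggers.map (fun t => t.1)) := (pvServiceTriggers.filter_sublist).map _
  refine PySem.List.sorted_eq_of_perm_of_pairwise_lt _ _ (fun x => x) ?_ ?_
  · -- perm with dedup (pvL dfs ses)
    have nd1 : ((pvServiceTriggers.filter p).map (fun t => t.1)).Nodup :=
      List.Nodup.sublist hsub (by decide)
    have nd2 : (PySem.List.dedup (pvL dfs ses)).Nodup := by
      simp only [PySem.List.dedup_eq_ofList]; exact PySem.Set.nodup_ofList _
    refine (List.perm_ext_iff_of_nodup nd1 nd2).mpr ?_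
    intro x
    simp only [PySem.List.dedup_eq_ofList, PySem.Set.mem_ofList]
    simp only [List.mem_map, List.mem_filter, pvServiceTriggers, List.mem_cons,
      List.not_mem_nil, or_false]
    constructor
    · rintro ⟨t, ⟨ht, hpt⟩, rfl⟩
      rcases ht with rfl | rfl | rfl | rfl | rfl | rfl
      · exact (pvCond_iff dfs ses _ _ _ pvChain_capture pvStage_capture).mp hpt
      · exact (pvCond_iff dfs ses _ _ _ pvChain_gateway pvStage_gateway).mp hpt
      · exact (pvCond_iff dfs ses _ _ _ pvChain_text_core pvStage_text_core).mp hpt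
      · exact (pvCond_iff dfs ses _ _ _ pvChain_tts pvStage_tts).mp hpt
      · exact (pvCond_iff dfs ses _ _ _ pvChain_vlm pvStage_vlm).mp hpt
      · exact (pvCond_iff dfs ses _ _ _ pvChain_voice pvStage_voice).mp hpt
    · intro hx
      have hx6 := pvL_sub dfs ses x hx
      simp only [List.mem_cons, List.not_mem_nil, or_false] at hx6
      rcases hx6 with rfl | rfl | rfl | rfl | rfl | rfl
      · exact ⟨_, ⟨Or.inl rfl, (pvCond_iff dfs ses _ _ _ pvChain_capture pvStage_capture).mpr hx⟩, rfl⟩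
      · exact ⟨_, ⟨Or.inr (Or.inl rfl), (pvCond_iff dfs ses _ _ _ pvChain_gateway pvStage_gateway).mpr hx⟩, rfl⟩
      · exact ⟨_, ⟨Or.inr (Or.inr (Or.inl rfl)), (pvCond_iff dfs ses _ _ _ pvChain_text_core pvStage_text_core).mpr hx⟩, rfl⟩
      · exact ⟨_, ⟨Or.inr (Or.inr (Or.inr (Or.inl rfl))), (pvCond_iff dfs ses _ _ _ pvChain_tts pvStage_tts).mpr hx⟩, rfl⟩
      · exact ⟨_, ⟨Or.inr (Or.inr (Or.inr (Or.inr (Or.inl rfl)))), (pvCond_iff dfs ses _ _ _ pvChain_vlm pvStage_vlm).mpr hx⟩, rfl⟩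
      · exact ⟨_, ⟨Or.inr (Or.inr (Or.inr (Or.inr (Or.inr rfl)))), (pvCond_iff dfs ses _ _ _ pvChain_voice pvStage_voice).mpr hx⟩, rfl⟩
  · -- strictly increasing
    exact List.Pairwise.sublist hsub (by simp [pvServiceTriggers, List.pairwise_cons]; decide)
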